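-- pv_equiv track=rewrite | github.com/jt-lanl/cov-voc | lineagenotes.py | first_last_splits
-- ===== SOURCE A (Python) =====
-- def first_last_splits(name: str, reverse: bool = False):
--     """
--     For dot-delimited name of form A.B.C...D,
--     iteratively yield tuples that split into first and last parts;
--     eg (A, B.C...D), (A.B, C...D), (A.B.C, ...D), etc
--     """
--     tokens = name.split(".")
--     nlist = range(len(tokens))
--     if reverse:
--         nlist = reversed(list(nlist))
--     for ndx in range(len(tokens)):
--         first, last = (".".join(tokens[:ndx]), ".".join(tokens[ndx:]))
--         yield first, last
-- ===== SOURCE B (Python) =====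
-- def first_last_splits(name: str, reverse: bool = False):
--     """
--     For a dot-delimited name, iteratively yield tuples that split it
--     into first and last parts, slicing at each dot position.
--     (reverse is accepted but unused, exactly as in the original)
--     """
--     dots = [i for i, c in enumerate(name) if c == '.']
--     yield '', name
--     for p in dots:
--         yield name[:p], name[p + 1:]
-- ===== Notes on version B (the rewrite author's own statement) =====
-- stated objective: simpler
-- what changed: Instead of splitting on dots and re-joining token-list prefixes/suffixes at every index, B precomputes the dot positions once, yields the empty-prefix/whole-string pair first, and then slices the original string at each dot position, so no join is ever performed.
import Mathlib
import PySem

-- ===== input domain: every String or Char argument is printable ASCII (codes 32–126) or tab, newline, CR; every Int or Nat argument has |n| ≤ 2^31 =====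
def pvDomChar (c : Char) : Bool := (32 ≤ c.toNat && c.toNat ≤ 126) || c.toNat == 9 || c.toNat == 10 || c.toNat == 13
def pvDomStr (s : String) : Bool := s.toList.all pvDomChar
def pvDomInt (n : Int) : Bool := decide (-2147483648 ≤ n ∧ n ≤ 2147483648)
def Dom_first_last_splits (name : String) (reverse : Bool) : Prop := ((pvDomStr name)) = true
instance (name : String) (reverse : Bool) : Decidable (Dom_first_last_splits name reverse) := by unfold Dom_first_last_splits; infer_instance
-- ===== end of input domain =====

-- B replaces A's split-then-rejoin of token-list prefixes/suffixes by slicing the original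
-- string at precomputed dot positions (objective: simpler; the generator is ported as the
-- list of yielded pairs; `reverse` is dead code in A and is kept, unused, in B).

-- ===== PORT A =====
-- tokens = name.split("."); for ndx in range(len(tokens)): yield ".".join(tokens[:ndx]), ".".join(tokens[ndx:])
def first_last_splits (name : String) (reverse : Bool) : List (String × String) :=
  let tokens : List String := (PySem.Str.split? name ".").getD []   -- sep ≠ "", never none
  let nlist : List Int := PySem.List.pyRange 0 (tokens.length : Int) 1
  let _nlist := if reverse then nlist.reverse else nlist            -- computed and unused, as in A
  (PySem.List.pyRange 0 (tokens.length : Int) 1).map (fun ndx =>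
    (PySem.Str.join "." (PySem.List.slice tokens none (some ndx)),
     PySem.Str.join "." (PySem.List.slice tokens (some ndx) none)))

-- ===== PORT B =====
-- dots = [i for i,c in enumerate(name) if c=='.']; yield '', name; for p in dots: yield name[:p], name[p+1:]
def first_last_splits_alt (name : String) (reverse : Bool) : List (String × String) :=
  let cs := name.toList
  let dots : List Int := (PySem.List.enumerate cs 0).filterMap
    (fun ic => if ic.2 = '.' then some ic.1 else none)
  ("", name) :: dots.map (fun p =>
    (String.ofList (PySem.List.slice cs none (some p)),
     String.ofList (PySem.List.slice cs (some (p + 1)) none)))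

-- ===== PRECONDITION & SPEC =====
def Spec_first_last_splits (name : String) (reverse : Bool) (out : List (String × String)) : Prop := out = first_last_splits_alt name reverse
instance (name : String) (reverse : Bool) (out : List (String × String)) : Decidable (Spec_first_last_splits name reverse out) := by unfold Spec_first_last_splits; infer_instance

-- ===== CLAIM (what is proved, stated in full; the proofs are below) =====
def Claim_equal_first_last_splits : Prop := ∀ (name : String) (reverse : Bool), Dom_first_last_splits name reverse → Spec_first_last_splits name reverse (first_last_splits name reverse)

-- ===== LEMMAS AND PROOFS =====

-- structural model of name.split(".") on the char-list side
def dotSplit : List Char → List (List Char)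
  | [] => [[]]
  | c :: rest =>
    if c = '.' then [] :: dotSplit rest
    else (dotSplit rest).modifyHead (fun t => c :: t)

-- positions of '.' in the char list
def dotPos : List Char → List Nat
  | [] => []
  | c :: rest =>
    if c = '.' then 0 :: (dotPos rest).map (· + 1)
    else (dotPos rest).map (· + 1)

theorem dotSplit_ne_nil (cs : List Char) : dotSplit cs ≠ [] := by
  cases cs with
  | nil => simp [dotSplit]
  | cons c rest =>
    simp only [dotSplit]
    split_ifs <;> simp [List.modifyHead]
    cases h : dotSplit rest with
    | nil => exact absurd h (dotSplit_ne_nil rest)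
    | cons t ts => simp

theorem splitOn_go_eq (l cur : List Char) (acc : List (List Char)) (fuel : Nat)
    (h : l.length ≤ fuel) :
    PySem.Chars.splitOn.go ['.'] fuel l cur acc
      = acc.reverse ++ (dotSplit l).modifyHead (fun t => cur.reverse ++ t) := by
  induction l generalizing cur acc fuel with
  | nil =>
    cases fuel <;> simp [PySem.Chars.splitOn.go, dotSplit]
  | cons c rest ih =>
    cases fuel with
    | zero => simp at h
    | succ fuel =>
      by_cases hc : c = '.'
      · subst hc
        simp only [PySem.Chars.splitOn.go]
        rw [if_pos (by simp [List.isPrefixOf])]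
        rw [show List.drop ['.'].length ('.' :: rest) = rest from rfl]
        rw [ih [] (List.reverse cur :: acc) fuel (by simpa using h)]
        cases h' : dotSplit rest with
        | nil => exact absurd h' (dotSplit_ne_nil rest)
        | cons t ts => simp [dotSplit, h', List.modifyHead]
      · simp only [PySem.Chars.splitOn.go]
        rw [if_neg (by simp [List.isPrefixOf]; exact fun e => hc e.symm)]
        rw [ih (c :: cur) acc fuel (by simpa using h)]
        cases h' : dotSplit rest with
        | nil => exact absurd h' (dotSplit_ne_nil rest)
        | cons t ts => simp [dotSplit, h', hc, List.modifyHead]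

theorem splitOn_eq_dotSplit (cs : List Char) :
    PySem.Chars.splitOn cs ['.'] = dotSplit cs := by
  rw [PySem.Chars.splitOn, splitOn_go_eq cs [] [] (cs.length + 1) (by omega)]
  cases h : dotSplit cs with
  | nil => exact absurd h (dotSplit_ne_nil cs)
  | cons t ts => simp [List.modifyHead]

theorem join_dotSplit (cs : List Char) :
    PySem.Chars.join ['.'] (dotSplit cs) = cs := by
  induction cs with
  | nil => simp [dotSplit, PySem.Chars.join_singleton]
  | cons c rest ih =>
    simp only [dotSplit]
    split_ifs with hc
    · subst hc
      cases h' : dotSplit rest with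
      | nil => exact absurd h' (dotSplit_ne_nil rest)
      | cons t ts =>
        rw [h'] at ih
        rw [PySem.Chars.join_cons_cons]
        simp [ih]
    · cases h' : dotSplit rest with
      | nil => exact absurd h' (dotSplit_ne_nil rest)
      | cons t ts =>
        rw [h'] at ih
        cases ts with
        | nil => simp_all [List.modifyHead, PySem.Chars.join_singleton]
        | cons u us =>
          rw [List.modifyHead, PySem.Chars.join_cons_cons]
          rw [PySem.Chars.join_cons_cons] at ih
          simp_all

theorem length_dotSplit (cs : List Char) :
    (dotSplit cs).length = (dotPos cs).length + 1 := by
  induction cs with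
  | nil => simp [dotSplit, dotPos]
  | cons c rest ih =>
    simp only [dotSplit, dotPos]
    split_ifs with hc
    · simp [ih]
    · cases h' : dotSplit rest with
      | nil => exact absurd h' (dotSplit_ne_nil rest)
      | cons t ts => rw [h'] at ih; simp [List.modifyHead]; simpa using ih

-- join of a cons with a nonempty tail
theorem join_cons_of_ne_nil (t : List Char) (l : List (List Char)) (h : l ≠ []) :
    PySem.Chars.join ['.'] (t :: l) = t ++ '.' :: PySem.Chars.join ['.'] l := by
  cases l with
  | nil => exact absurd rfl h
  | cons u us => rw [PySem.Chars.join_cons_cons]; simp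

-- the positional correspondence: the (j+1)-st split of A equals slicing at the j-th dot
theorem pos_correspondence (cs : List Char) (j : Nat) (hj : j < (dotPos cs).length) :
    PySem.Chars.join ['.'] ((dotSplit cs).take (j + 1)) = cs.take ((dotPos cs)[j]!)
    ∧ PySem.Chars.join ['.'] ((dotSplit cs).drop (j + 1)) = cs.drop ((dotPos cs)[j]! + 1) := by
  induction cs generalizing j with
  | nil => simp [dotPos] at hj
  | cons c rest ih =>
    by_cases hc : c = '.'
    · subst hc
      have hds : dotSplit ('.' :: rest) = [] :: dotSplit rest := by simp [dotSplit]
      have hdp : dotPos ('.' :: rest) = 0 :: (dotPos rest).map (· + 1) := by simp [dotPos]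
      rw [hdp] at hj
      rw [hds, hdp]
      cases j with
      | zero =>
        constructor
        · simp [PySem.Chars.join_singleton]
        · simp [join_dotSplit]
      | succ j =>
        have hj' : j < (dotPos rest).length := by simpa using hj
        obtain ⟨ih1, ih2⟩ := ih j hj'
        have hidx : ((0 : Nat) :: (dotPos rest).map (· + 1))[j + 1]! = (dotPos rest)[j]! + 1 := by
          simp [List.getElem!_eq_getElem?_getD, List.getElem?_eq_getElem hj']
        rw [hidx]
        have htk : (([] : List Char) :: dotSplit rest).take (j + 1 + 1)
            = ([] : List Char) :: (dotSplit rest).take (j + 1) := by simp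
        have hne : (dotSplit rest).take (j + 1) ≠ [] := by
          cases h' : dotSplit rest with
          | nil => exact absurd h' (dotSplit_ne_nil rest)
          | cons a b => simp
        constructor
        · rw [htk, join_cons_of_ne_nil _ _ hne, ih1]; simp
        · rw [show (([] : List Char) :: dotSplit rest).drop (j + 1 + 1)
              = (dotSplit rest).drop (j + 1) from rfl, ih2]
          simp
    · have hds : dotSplit (c :: rest) = (dotSplit rest).modifyHead (fun t => c :: t) := by
        simp [dotSplit, hc]
      have hdp : dotPos (c :: rest) = (dotPos rest).map (· + 1) := by simp [dotPos, hc]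
      rw [hdp] at hj
      rw [hds, hdp]
      have hj' : j < (dotPos rest).length := by simpa using hj
      obtain ⟨ih1, ih2⟩ := ih j hj'
      have hidx : ((dotPos rest).map (· + 1))[j]! = (dotPos rest)[j]! + 1 := by
        simp [List.getElem!_eq_getElem?_getD, List.getElem?_eq_getElem hj']
      rw [hidx]
      cases h' : dotSplit rest with
      | nil => exact absurd h' (dotSplit_ne_nil rest)
      | cons t ts =>
        rw [h'] at ih1 ih2
        constructor
        · rw [show ((t :: ts).modifyHead (fun u => c :: u)).take (j + 1)
              = (c :: t) :: ts.take j from by simp [List.modifyHead]]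
          rw [show (t :: ts).take (j + 1) = t :: ts.take j from by simp] at ih1
          by_cases hts : ts.take j = []
          · rw [hts] at ih1 ⊢
            rw [PySem.Chars.join_singleton] at ih1 ⊢
            simp [ih1]
          · rw [join_cons_of_ne_nil _ _ hts] at ih1 ⊢
            simp [ih1]
        · rw [show ((t :: ts).modifyHead (fun u => c :: u)).drop (j + 1)
              = ts.drop j from by simp [List.modifyHead]]
          rw [show (t :: ts).drop (j + 1) = ts.drop j from rfl] at ih2
          rw [ih2]; rfl

-- B's dot scan produces exactly (dotPos cs) shifted by the start offset
theorem enum_filter_eq_dotPos (cs : List Char) (s : Int) :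
    (PySem.List.enumerate cs s).filterMap
        (fun ic => if ic.2 = '.' then some ic.1 else none)
      = (dotPos cs).map (fun p : Nat => s + (p : Int)) := by
  induction cs generalizing s with
  | nil => simp [PySem.List.enumerate_nil, dotPos]
  | cons c rest ih =>
    rw [PySem.List.enumerate_cons, List.filterMap_cons]
    by_cases hc : c = '.'
    · rw [show (if (s, c).2 = '.' then some (s, c).1 else none) = some s from by simp [hc]]
      rw [show dotPos (c :: rest) = 0 :: (dotPos rest).map (· + 1) from by simp [dotPos, hc]]
      rw [ih (s + 1), List.map_cons, List.map_map]
      refine congrArg₂ List.cons (by push_cast; ring) ?_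
      apply List.map_congr_left; intro p _; simp only [Function.comp_apply]; push_cast; ring
    · rw [show (if (s, c).2 = '.' then some (s, c).1 else none) = none from by simp [hc]]
      rw [show dotPos (c :: rest) = (dotPos rest).map (· + 1) from by simp [dotPos, hc]]
      rw [ih (s + 1), List.map_map]
      apply List.map_congr_left; intro p _; simp only [Function.comp_apply]; push_cast; ring

-- the char-level main equality between the two programs' pair lists
theorem main_chars (cs : List Char) :
    (List.range (dotSplit cs).length).map (fun n =>
        (PySem.Chars.join ['.'] ((dotSplit cs).take n),
         PySem.Chars.join ['.'] ((dotSplit cs).drop n)))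
      = (([] : List Char), cs) :: (dotPos cs).map (fun p => (cs.take p, cs.drop (p + 1))) := by
  apply List.ext_getElem
  · simp [length_dotSplit cs]
  · intro i h1 h2
    have hlen : (dotSplit cs).length = (dotPos cs).length + 1 := length_dotSplit cs
    simp only [List.getElem_map, List.getElem_range]
    cases i with
    | zero =>
      simp [join_dotSplit]
    | succ j =>
      have hj : j < (dotPos cs).length := by
        simp [hlen] at h1; omega
      obtain ⟨p1, p2⟩ := pos_correspondence cs j hj
      simp only [List.getElem_cons_succ, List.getElem_map]
      rw [p1, p2]
      simp [List.getElem!_eq_getElem?_getD, List.getElem?_eq_getElem hj]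

-- ===== VERDICT (by name: the statement is the Claim_ definition above) =====
theorem first_last_splits_spec : Claim_equal_first_last_splits := by
  intro name reverse _
  unfold Spec_first_last_splits first_last_splits first_last_splits_alt
  simp only []
  set cs := name.toList with hcs
  -- A's tokens are the char-level dotSplit, wrapped back into Strings
  have hsplit : (PySem.Str.split? name ".").getD []
      = (dotSplit cs).map String.ofList := by
    have h := PySem.Str.split?_map name "."
    rw [show ("." : String).toList = ['.'] from rfl] at h
    rw [PySem.Chars.split?] at h
    simp only [List.isEmpty_cons, Bool.false_eq_true, if_false] at h
    cases hs : PySem.Str.split? name "." with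
    | none => rw [hs] at h; simp at h
    | some parts =>
      rw [hs] at h
      simp only [Option.map_some] at h
      have hparts : parts.map String.toList = dotSplit cs := by
        injection h with h'; rw [h', splitOn_eq_dotSplit]
      simp only [Option.getD_some]
      calc parts = (parts.map String.toList).map String.ofList := by
                simp [List.map_map, Function.comp_def]
        _ = (dotSplit cs).map String.ofList := by rw [hparts]
  rw [hsplit]
  rw [enum_filter_eq_dotPos cs 0]
  rw [List.length_map, PySem.List.pyRange_zero_nat]
  rw [List.map_map, List.map_map]
  have key := main_chars cs
  -- turn the goal into the image of `main_chars` under ofList on both components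
  have lhs_eq : ∀ n ∈ List.range (dotSplit cs).length,
      ((fun ndx : Int =>
        (PySem.Str.join "." (PySem.List.slice ((dotSplit cs).map String.ofList) none (some ndx)),
         PySem.Str.join "." (PySem.List.slice ((dotSplit cs).map String.ofList) (some ndx) none)))
        ∘ (fun k : Nat => (k : Int))) n
      = (fun n =>
         (String.ofList (PySem.Chars.join ['.'] ((dotSplit cs).take n)),
          String.ofList (PySem.Chars.join ['.'] ((dotSplit cs).drop n)))) n := by
    intro n _
    simp only [Function.comp]
    rw [PySem.List.slice_to_natCast, PySem.List.slice_from_natCast]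
    rw [← List.map_take, ← List.map_drop]
    refine congrArg₂ Prod.mk ?_ ?_ <;>
    · apply String.toList_injective
      rw [PySem.Str.toList_join]
      simp [List.map_map, Function.comp_def, show ("." : String).toList = ['.'] from rfl]
  rw [List.map_congr_left lhs_eq]
  have rhs_eq : ∀ p ∈ dotPos cs,
      ((fun p : Int =>
        (String.ofList (PySem.List.slice cs none (some p)),
         String.ofList (PySem.List.slice cs (some (p + 1)) none)))
        ∘ (fun p : Nat => (0 : Int) + (p : Int))) p
      = (fun p : Nat =>
         (String.ofList (cs.take p), String.ofList (cs.drop (p + 1)))) p := by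
    intro p _
    simp only [Function.comp, zero_add]
    rw [PySem.List.slice_to_natCast]
    rw [show ((p : Int) + 1) = ((p + 1 : Nat) : Int) from by push_cast; ring,
        PySem.List.slice_from_natCast]
  rw [List.map_congr_left rhs_eq]
  have := congrArg (List.map (fun q : List Char × List Char =>
      (String.ofList q.1, String.ofList q.2))) key
  simp only [List.map_map, List.map_cons] at this
  convert this using 2 <;> simp [hcs]
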